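-- pv_equiv track=rewrite | github.com/DenisLet/old-others | venv/SoccerHalfs.py | indication
-- ===== SOURCE A (Python) =====
-- def indication(list):
--     null,one,more,amount = 0,0,0,0
--     for i in list:
--         amount += 1
--         if i == 0:
--             null += 1
--         if i == 1:
--             one += 1
--         if i > 1:
--             more += 1
--     return null,one,more,amount
-- ===== SOURCE B (Python) =====
-- def indication(list):
--     # idiomatic: each component via a dedicated library pass instead of one branching loop
--     null = list.count(0)
--     one = list.count(1)
--     more = sum(1 for i in list if i > 1)
--     amount = len(list)
--     return null, one, more, amount
-- ===== Notes on version B (the rewrite author's own statement) =====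
-- stated objective: idiomatic
-- what changed: Replaces the single four-accumulator branching loop with independent library passes: list.count(0), list.count(1), a filtered generator sum for values > 1, and len(list).
import Mathlib
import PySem

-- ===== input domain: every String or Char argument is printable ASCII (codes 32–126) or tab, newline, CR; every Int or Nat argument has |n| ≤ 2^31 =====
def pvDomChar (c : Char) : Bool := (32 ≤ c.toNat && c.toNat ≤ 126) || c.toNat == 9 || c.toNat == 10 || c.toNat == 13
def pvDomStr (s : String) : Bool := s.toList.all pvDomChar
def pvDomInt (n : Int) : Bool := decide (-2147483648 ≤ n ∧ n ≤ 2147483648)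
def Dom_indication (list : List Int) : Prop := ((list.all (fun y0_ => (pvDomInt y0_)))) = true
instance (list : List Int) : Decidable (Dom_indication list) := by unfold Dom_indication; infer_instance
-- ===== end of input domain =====

-- B replaces A's single four-accumulator branching loop with independent library passes (count/count/filtered sum/len); idiomatic, same cost.

-- ===== PORT A =====
def indication (list : List Int) : Int × Int × Int × Int :=
  let s := list.foldl
    (fun (st : Int × Int × Int × Int) (i : Int) =>
      let (null, one, more, amount) := st
      let amount := amount + 1
      let null := if i == 0 then null + 1 else null
      let one := if i == 1 then one + 1 else one
      let more := if i > 1 then more + 1 else more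
      (null, one, more, amount))
    (0, 0, 0, 0)
  s

-- ===== PORT B =====
def indication_alt (list : List Int) : Int × Int × Int × Int :=
  let null : Int := PySem.List.count list 0
  let one : Int := PySem.List.count list 1
  let more : Int := ((list.filter (fun i => decide (1 < i))).map (fun _ => (1 : Int))).sum
  let amount : Int := list.length
  (null, one, more, amount)

-- ===== PRECONDITION & SPEC =====
def Spec_indication (list : List Int) (out : Int × Int × Int × Int) : Prop := out = indication_alt list
instance (list : List Int) (out : Int × Int × Int × Int) : Decidable (Spec_indication list out) := by unfold Spec_indication; infer_instance

-- ===== CLAIM (what is proved, stated in full; the proofs are below) =====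
def Claim_equal_indication : Prop := ∀ (list : List Int), Dom_indication list → Spec_indication list (indication list)

-- ===== LEMMAS AND PROOFS =====
theorem indication_foldl (l : List Int) (n o m a : Int) :
    l.foldl
      (fun (st : Int × Int × Int × Int) (i : Int) =>
        let (null, one, more, amount) := st
        let amount := amount + 1
        let null := if i == 0 then null + 1 else null
        let one := if i == 1 then one + 1 else one
        let more := if i > 1 then more + 1 else more
        (null, one, more, amount))
      (n, o, m, a)
    = (n + l.count 0, o + l.count 1,
       m + ((l.filter (fun i => decide (1 < i))).map (fun _ => (1 : Int))).sum,
       a + l.length) := by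
  induction l generalizing n o m a with
  | nil => simp
  | cons x xs ih =>
    rw [List.foldl_cons, ih]
    simp only [List.count_cons, List.filter_cons, List.length_cons, Prod.mk.injEq]
    refine ⟨?_, ?_, ?_, ?_⟩
    · by_cases h : x = 0 <;> simp [h] <;> push_cast <;> ring
    · by_cases h : x = 1 <;> simp [h] <;> push_cast <;> ring
    · by_cases h : 1 < x <;> simp [h] <;> push_cast <;> ring
    · push_cast; ring

-- ===== VERDICT (by name: the statement is the Claim_ definition above) =====
theorem indication_spec : Claim_equal_indication := by
  intro list _
  show indication list = indication_alt list
  unfold indication indication_alt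
  rw [indication_foldl]
  simp [PySem.List.count_eq]
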